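-- pv_equiv track=rewrite | github.com/abc123s/match_recipe_ingredients | model/preprocessing/tokenizer.py | cleanCommonEscapeSequences
-- ===== SOURCE A (Python) =====
-- def cleanCommonEscapeSequences(s):
--     escape_sequences = [
--         '\\n',
--         '\\t',
--     ]
--
--     for escape_sequence in escape_sequences:
--         s = s.replace(escape_sequence, ' ')
--
--     return s
-- ===== SOURCE B (Python) =====
-- def cleanCommonEscapeSequences(s):
--     out = []
--     i = 0
--     n = len(s)
--     while i < n:
--         if i + 1 < n and s[i] == '\\' and (s[i + 1] == 'n' or s[i + 1] == 't'):
--             out.append(' ')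
--             i += 2
--         else:
--             out.append(s[i])
--             i += 1
--     return ''.join(out)
-- ===== Notes on version B (the rewrite author's own statement) =====
-- stated objective: alternative
-- what changed: Two sequential str.replace passes over the whole string are replaced by a single left-to-right character scan that recognises both two-char escape sequences inline and builds the output once.
import Mathlib
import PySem

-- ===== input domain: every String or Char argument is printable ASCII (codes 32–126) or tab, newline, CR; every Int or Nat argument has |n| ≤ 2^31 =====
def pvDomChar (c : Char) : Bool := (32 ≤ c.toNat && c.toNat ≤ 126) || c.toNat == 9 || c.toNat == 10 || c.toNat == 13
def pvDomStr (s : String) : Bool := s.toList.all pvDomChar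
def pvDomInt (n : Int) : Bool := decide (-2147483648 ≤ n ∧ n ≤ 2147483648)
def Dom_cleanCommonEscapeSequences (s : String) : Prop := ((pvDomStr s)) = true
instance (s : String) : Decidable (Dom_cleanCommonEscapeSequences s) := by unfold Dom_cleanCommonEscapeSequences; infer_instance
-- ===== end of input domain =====

-- B fuses A's two sequential .replace passes into one character-level scan; same result, one pass.

-- ===== PORT A =====
def cleanCommonEscapeSequences (s : String) : String :=
  let escapeSequences : List String := ["\\n", "\\t"]
  escapeSequences.foldl (fun acc esc => PySem.Str.replace acc esc " ") s

-- ===== PORT B =====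
-- B's while-loop index scan over the characters, as structural recursion on the char list
def scanEsc : List Char → List Char
  | [] => []
  | [c] => [c]
  | c1 :: c2 :: t =>
    if c1 = '\\' ∧ (c2 = 'n' ∨ c2 = 't') then ' ' :: scanEsc t
    else c1 :: scanEsc (c2 :: t)

def cleanCommonEscapeSequences_alt (s : String) : String :=
  String.ofList (scanEsc s.toList)

-- ===== PRECONDITION & SPEC =====
def Spec_cleanCommonEscapeSequences (s : String) (out : String) : Prop := out = cleanCommonEscapeSequences_alt s
instance (s : String) (out : String) : Decidable (Spec_cleanCommonEscapeSequences s out) := by unfold Spec_cleanCommonEscapeSequences; infer_instance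

-- ===== CLAIM (what is proved, stated in full; the proofs are below) =====
def Claim_equal_cleanCommonEscapeSequences : Prop := ∀ (s : String), Dom_cleanCommonEscapeSequences s → Spec_cleanCommonEscapeSequences s (cleanCommonEscapeSequences s)

-- ===== LEMMAS AND PROOFS =====

-- a single .replace pass with a two-char pattern and " " replacement, written as plain recursion
def repl2 (a b : Char) : List Char → List Char
  | [] => []
  | [c] => [c]
  | c1 :: c2 :: t =>
    if c1 = a ∧ c2 = b then ' ' :: repl2 a b t
    else c1 :: repl2 a b (c2 :: t)

lemma go_eq (a b : Char) : ∀ (fuel : Nat) (l acc : List Char), l.length ≤ fuel →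
    PySem.Chars.replace.go [a, b] [' '] fuel l acc = acc.reverse ++ repl2 a b l := by
  intro fuel
  induction fuel with
  | zero =>
    intro l acc h
    have : l = [] := List.eq_nil_of_length_eq_zero (Nat.le_zero.mp h)
    subst this
    simp [PySem.Chars.replace.go, repl2]
  | succ n ih =>
    intro l acc h
    match l with
    | [] => simp [PySem.Chars.replace.go, repl2]
    | [c] =>
      rw [PySem.Chars.replace.go]
      have hpre : [a, b].isPrefixOf [c] = false := by
        simp [List.isPrefixOf]
      simp only [hpre, Bool.false_eq_true, if_false]
      rw [ih [] (c :: acc) (by simp)]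
      simp [repl2]
    | c1 :: c2 :: t =>
      rw [PySem.Chars.replace.go]
      by_cases hc : c1 = a ∧ c2 = b
      · obtain ⟨h1, h2⟩ := hc
        subst h1; subst h2
        have hpre : [c1, c2].isPrefixOf (c1 :: c2 :: t) = true := by
          simp [List.isPrefixOf]
        simp only [hpre, if_true]
        rw [show List.drop [c1, c2].length (c1 :: c2 :: t) = t from rfl,
            show ([' '].reverse ++ acc) = ' ' :: acc from rfl]
        rw [ih t (' ' :: acc) (by simp at h ⊢; omega)]
        rw [repl2]
        simp
      · have hpre : [a, b].isPrefixOf (c1 :: c2 :: t) = false := by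
          simp only [List.isPrefixOf, Bool.and_eq_false_iff, beq_eq_false_iff_ne, ne_eq]
          by_cases h1 : a = c1
          · subst h1
            right; left
            exact fun h2 => hc ⟨rfl, h2.symm⟩
          · left; exact h1
        simp only [hpre, Bool.false_eq_true, if_false]
        rw [ih (c2 :: t) (c1 :: acc) (by simp at h ⊢; omega)]
        rw [repl2]
        simp [hc]

lemma replace_eq_repl2 (a b : Char) (cs : List Char) :
    PySem.Chars.replace cs [a, b] [' '] = repl2 a b cs := by
  rw [PySem.Chars.replace]
  simp only [List.isEmpty, Bool.false_eq_true, if_false]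
  exact go_eq a b cs.length cs [] le_rfl

-- matching head: the pass consumes both chars and emits a space
lemma repl2_match (a b : Char) (t : List Char) :
    repl2 a b (a :: b :: t) = ' ' :: repl2 a b t := by
  rw [repl2]; simp

-- no match at the head when the first char differs from a or the next char differs from b
lemma repl2_cons_no_match (a b c : Char) (L : List Char)
    (h : ¬(c = a ∧ L.head? = some b)) :
    repl2 a b (c :: L) = c :: repl2 a b L := by
  match L with
  | [] => rfl
  | d :: t =>
    rw [repl2]
    have hx : ¬(c = a ∧ d = b) := fun ⟨h1, h2⟩ => h ⟨h1, by simp [h2]⟩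
    simp [hx]

-- a pass can only keep the original head or put a space there
lemma repl2_head (a b : Char) (L : List Char) :
    (repl2 a b L).head? = L.head? ∨ (repl2 a b L).head? = some ' ' := by
  match L with
  | [] => left; rfl
  | [c] => left; rfl
  | c1 :: c2 :: t =>
    rw [repl2]
    by_cases hc : c1 = a ∧ c2 = b
    · right; simp [hc]
    · left; simp [hc]

lemma two_passes_eq_scan (cs : List Char) :
    repl2 '\\' 't' (repl2 '\\' 'n' cs) = scanEsc cs := by
  induction cs using scanEsc.induct with
  | case1 => rfl
  | case2 c => rfl
  | case3 c1 c2 t hc ih =>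
    obtain ⟨h1, h2⟩ := hc
    subst h1
    rcases h2 with h2 | h2
    · subst h2
      rw [repl2_match]
      rw [repl2_cons_no_match _ _ _ _ (by simp)]
      rw [ih, scanEsc]
      simp
    · subst h2
      rw [repl2_cons_no_match '\\' 'n' '\\' ('t' :: t) (by simp)]
      rw [repl2_cons_no_match '\\' 'n' 't' t (by simp)]
      rw [repl2_match]
      rw [ih, scanEsc]
      simp
  | case4 c1 c2 t hc ih =>
    have hnt : ¬(c1 = '\\' ∧ c2 = 'n') ∧ ¬(c1 = '\\' ∧ c2 = 't') := by
      constructor <;> rintro ⟨h1, h2⟩ <;> exact hc ⟨h1, by simp [h2]⟩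
    rw [repl2_cons_no_match '\\' 'n' c1 (c2 :: t)
      (by rintro ⟨h1, h2⟩; simp at h2; exact hnt.1 ⟨h1, h2⟩)]
    rw [repl2_cons_no_match '\\' 't' c1 (repl2 '\\' 'n' (c2 :: t))
      (by
        rintro ⟨h1, h2⟩
        rcases repl2_head '\\' 'n' (c2 :: t) with hh | hh
        · rw [hh] at h2; simp at h2
          exact hnt.2 ⟨h1, h2⟩
        · rw [hh] at h2; simp at h2)]
    rw [ih, scanEsc]
    simp [hc]

-- ===== VERDICT (by name: the statement is the Claim_ definition above) =====
theorem cleanCommonEscapeSequences_spec : Claim_equal_cleanCommonEscapeSequences := by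
  intro s _
  show cleanCommonEscapeSequences s = cleanCommonEscapeSequences_alt s
  unfold cleanCommonEscapeSequences cleanCommonEscapeSequences_alt
  simp only [List.foldl]
  rw [PySem.Str.replace, PySem.Str.replace]
  rw [show ("\\n" : String).toList = ['\\', 'n'] from rfl,
      show ("\\t" : String).toList = ['\\', 't'] from rfl,
      show (" " : String).toList = [' '] from rfl]
  rw [show (String.ofList (PySem.Chars.replace s.toList ['\\', 'n'] [' '])).toList
        = PySem.Chars.replace s.toList ['\\', 'n'] [' '] by simp]
  rw [replace_eq_repl2, replace_eq_repl2, two_passes_eq_scan]
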